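-- pv_equiv track=rewrite | github.com/justinkacher/read_HX711 | RaspberryPi_Read.py | twotodec
-- ===== SOURCE A (Python) =====
-- def twotodec(num):                                  #converts two's compliment output of HX711 to a decimal number we can interpret
--
--     # to convert from 2's compliment to bianary:
--     # invert bianary of 2's compliment
--     # add 1 and convert back to decimal
--
--     inverse = ''
--     binnum = bin(num)
--     if binnum[0] == '-':            #removes signed bit to make inversion smoother
--         sign = binnum[0:3]          #bit 0 is a signed bit ... 1 and 2 are "0b"
--         unsign = binnum[3:]
--     else:
--         sign = binnum[0:2]          #bit 0 is a signed bit ... 1 and 2 are "0b"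
--         unsign = binnum[2:]
--
--     for x in unsign:                #returns inverse of unsign
--
--         if x == '0':
--             inverse += '1'
--         else:
--             inverse += '0'
--
--     convertednum = int(inverse,2)      #converts to integer from base 2
--     convertednum+=1                    #add 1 to inverted integer
--     return convertednum
-- ===== SOURCE B (Python) =====
-- def twotodec(num):
--     # closed form: bin's digit string of |num| has value m=|num| and length
--     # L = max(1, m.bit_length()); inverting it and adding 1 gives 2**L - m.
--     m = abs(num)
--     L = max(1, m.bit_length())
--     return (1 << L) - m
-- ===== Notes on version B (the rewrite author's own statement) =====
-- stated objective: simpler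
-- what changed: Replaces the string round-trip (bin, prefix slicing, per-character inversion loop, int(_,2) re-parse) with the closed form 2**max(1,abs(num).bit_length()) - abs(num).
import Mathlib
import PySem

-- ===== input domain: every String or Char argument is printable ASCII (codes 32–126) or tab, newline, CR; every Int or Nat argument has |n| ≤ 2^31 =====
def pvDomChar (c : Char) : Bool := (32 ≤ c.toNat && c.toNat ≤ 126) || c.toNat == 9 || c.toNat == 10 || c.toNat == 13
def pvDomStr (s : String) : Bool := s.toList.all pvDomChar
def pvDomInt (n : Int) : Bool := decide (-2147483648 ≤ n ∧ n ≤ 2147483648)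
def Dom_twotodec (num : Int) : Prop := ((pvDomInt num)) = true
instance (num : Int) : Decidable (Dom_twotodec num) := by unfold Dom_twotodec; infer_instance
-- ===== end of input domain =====

-- B replaces A's string round-trip (bin, slicing, char-inversion loop, int(_,2))
-- with the closed form 2^max(1,bitlen |num|) - |num|; return values agree on all ints.

-- ===== PORT A =====
-- digits of n in base 2, msb first, empty for 0 (helper for the hand port of Python's bin)
def pvBits (n : Nat) : List Char :=
  if n = 0 then []
  else pvBits (n / 2) ++ [if n % 2 = 1 then '1' else '0']
decreasing_by exact Nat.div_lt_self (Nat.pos_of_ne_zero (by assumption)) (by norm_num)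

-- bin(num) as a list of chars: sign, then "0b", then magnitude digits ('0' for zero) — exact for ints
def pvBin (num : Int) : List Char :=
  (if num < 0 then ['-'] else []) ++ ['0', 'b'] ++
    (if num.natAbs = 0 then ['0'] else pvBits num.natAbs)

-- int(s, 2) on a list of binary digit chars — exact for strings of '0'/'1'
def pvParse2 (l : List Char) : Nat :=
  l.foldl (fun a c => 2 * a + (if c = '1' then 1 else 0)) 0

def twotodec (num : Int) : Int :=
  let binnum := pvBin num
  let unsign := if binnum.headD ' ' = '-' then binnum.drop 3 else binnum.drop 2
  let inverse := unsign.foldl (fun acc x => acc ++ [if x = '0' then '1' else '0']) ([] : List Char)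
  let convertednum : Int := (pvParse2 inverse : Nat)
  convertednum + 1

-- ===== PORT B =====
-- n.bit_length()
def pvBitLen (n : Nat) : Nat :=
  if n = 0 then 0 else pvBitLen (n / 2) + 1
decreasing_by exact Nat.div_lt_self (Nat.pos_of_ne_zero (by assumption)) (by norm_num)

def twotodec_alt (num : Int) : Int :=
  let m := num.natAbs
  let L := max 1 (pvBitLen m)
  ((2 ^ L : Nat) : Int) - (m : Int)

-- ===== PRECONDITION & SPEC =====
def Spec_twotodec (num : Int) (out : Int) : Prop := out = twotodec_alt num
instance (num : Int) (out : Int) : Decidable (Spec_twotodec num out) := by unfold Spec_twotodec; infer_instance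

-- ===== CLAIM (what is proved, stated in full; the proofs are below) =====
def Claim_equal_twotodec : Prop := ∀ (num : Int), Dom_twotodec num → Spec_twotodec num (twotodec num)

-- ===== LEMMAS AND PROOFS =====

theorem pvBits_length (n : Nat) : (pvBits n).length = pvBitLen n := by
  induction n using Nat.strong_induction_on with
  | _ n ih =>
    rw [pvBits, pvBitLen]
    split
    · simp
    · simp [ih (n / 2) (Nat.div_lt_self (Nat.pos_of_ne_zero (by assumption)) (by norm_num))]

theorem pvBits_mem (n : Nat) : ∀ c ∈ pvBits n, c = '0' ∨ c = '1' := by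
  induction n using Nat.strong_induction_on with
  | _ n ih =>
    rw [pvBits]
    split
    · simp
    · intro c hc
      rcases List.mem_append.mp hc with h | h
      · exact ih (n / 2) (Nat.div_lt_self (Nat.pos_of_ne_zero (by assumption)) (by norm_num)) c h
      · simp at h; split at h <;> simp [h]

theorem pvBits_val (n : Nat) : ∀ a : Nat,
    (pvBits n).foldl (fun a c => 2 * a + (if c = '1' then 1 else 0)) a
      = a * 2 ^ (pvBits n).length + n := by
  induction n using Nat.strong_induction_on with
  | _ n ih =>
    intro a
    rw [pvBits]
    split
    · simp; omega
    · rename_i hn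
      rw [List.foldl_append, ih (n / 2) (Nat.div_lt_self (Nat.pos_of_ne_zero hn) (by norm_num))]
      simp [List.foldl, pow_succ]
      split <;> rename_i h
      · have : n % 2 = 1 := by
          rcases Nat.mod_two_eq_zero_or_one n with h0 | h1
          · simp [h0] at h
          · exact h1
        ring_nf
        omega
      · have : n % 2 = 0 := by
          rcases Nat.mod_two_eq_zero_or_one n with h0 | h1
          · exact h0
          · simp [h1] at h
        ring_nf
        omega

-- the inversion loop builds map flip
theorem inverse_eq_map (l acc : List Char) :
    l.foldl (fun acc x => acc ++ [if x = '0' then '1' else '0']) acc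
      = acc ++ l.map (fun x => if x = '0' then '1' else '0') := by
  induction l generalizing acc with
  | nil => simp
  | cons c t ih => simp [List.foldl, ih]

-- parsing a list plus parsing its bit-flip sums to 2^len - 1
theorem parse_flip (l : List Char) (hl : ∀ c ∈ l, c = '0' ∨ c = '1') :
    ∀ a a' : Nat,
    (l.map (fun x => if x = '0' then '1' else '0')).foldl
        (fun a c => 2 * a + (if c = '1' then 1 else 0)) a
      + l.foldl (fun a c => 2 * a + (if c = '1' then 1 else 0)) a'
      = (a + a') * 2 ^ l.length + 2 ^ l.length - 1 := by
  induction l with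
  | nil => intro a a'; simp
  | cons c t ih =>
    intro a a'
    have hc := hl c (by simp)
    have ht : ∀ c ∈ t, c = '0' ∨ c = '1' := fun x hx => hl x (by simp [hx])
    simp only [List.map_cons, List.foldl_cons]
    rw [ih ht]
    have h2 : (1 : Nat) ≤ 2 ^ t.length := Nat.one_le_two_pow
    rcases hc with h | h <;> simp [h, List.length_cons, pow_succ] <;> ring_nf <;> omega

-- ===== VERDICT (by name: the statement is the Claim_ definition above) =====
theorem twotodec_spec : Claim_equal_twotodec := by
  intro num _
  unfold Spec_twotodec twotodec twotodec_alt
  set m := num.natAbs with hm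
  -- unsign is exactly the digit list
  have hdigits : (let binnum := pvBin num
      if binnum.headD ' ' = '-' then binnum.drop 3 else binnum.drop 2)
      = (if m = 0 then ['0'] else pvBits m) := by
    unfold pvBin
    by_cases hneg : num < 0 <;> simp [hneg, ← hm]
  simp only [hdigits]
  set digs : List Char := if m = 0 then ['0'] else pvBits m with hd
  have hmem : ∀ c ∈ digs, c = '0' ∨ c = '1' := by
    rw [hd]; split
    · simp
    · exact pvBits_mem m
  have hval : digs.foldl (fun a c => 2 * a + (if c = '1' then 1 else 0)) 0 = m := by
    rw [hd]; split
    · simp [List.foldl]; omega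
    · simpa using pvBits_val m 0
  have hlen : digs.length = max 1 (pvBitLen m) := by
    rw [hd]; split
    · rename_i h0; simp [h0, pvBitLen]
    · rename_i h0
      rw [pvBits_length]
      have : 1 ≤ pvBitLen m := by rw [pvBitLen]; simp [h0]
      omega
  rw [inverse_eq_map]
  simp only [List.nil_append]
  have key := parse_flip digs hmem 0 0
  rw [hval] at key
  unfold pvParse2
  set L := max 1 (pvBitLen m)
  have hLlen : digs.length = L := hlen
  rw [hLlen] at key
  set inv := (digs.map (fun x => if x = '0' then '1' else '0')).foldl
      (fun a c => 2 * a + (if c = '1' then 1 else 0)) 0 with hinv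
  have h2 : (1 : Nat) ≤ 2 ^ L := Nat.one_le_two_pow
  have : inv + m + 1 = 2 ^ L := by omega
  have hcast : ((inv : Int) + m + 1) = ((2 ^ L : Nat) : Int) := by
    exact_mod_cast congrArg (fun k : Nat => (k : Int)) this
  push_cast at hcast ⊢
  omega
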